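-- pv_equiv track=rewrite | github.com/yannleretaille/awg-openwrt-repos | scripts/build_apk_repo.py | infer_target_subtarget_from_pairs
-- ===== SOURCE A (Python) =====
-- from typing import Any, Dict, Iterable, List, Optional, Tuple
--
-- def infer_target_subtarget_from_pairs(
--     suffix_full: str,
--     known_pairs: set[Tuple[str, str]],
-- ) -> Tuple[Optional[str], Optional[str]]:
--     best: Optional[Tuple[str, str]] = None
--     best_len = -1
--     for target, subtarget in known_pairs:
--         marker = f"_{target}_{subtarget}"
--         if suffix_full.endswith(marker):
--             score = len(target) + len(subtarget)
--             if score > best_len: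
--                 best_len = score
--                 best = (target, subtarget)
--     if best:
--         return best
--     return None, None
-- ===== SOURCE B (Python) =====
-- def infer_target_subtarget_from_pairs(suffix_full, known_pairs):
--     index = {}
--     for target, subtarget in known_pairs:
--         marker = f"_{target}_{subtarget}"
--         if marker not in index:
--             index[marker] = (target, subtarget)
--     longest = 0
--     for marker in index:
--         longest = max(longest, len(marker))
--     for i in range(max(0, len(suffix_full) - longest), len(suffix_full) + 1):
--         candidate = suffix_full[i:]
--         if candidate in index:
--             return index[candidate]
--     return None, None
-- ===== Notes on version B (the rewrite author's own statement) =====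
-- stated objective: alternative
-- what changed: Instead of testing every pair's marker with endswith and tracking the running best score, B builds a first-wins dict from marker strings to pairs once, then scans the string's suffixes (only those no longer than the longest marker) longest-first and returns the first suffix present in the dict.
import Mathlib
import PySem

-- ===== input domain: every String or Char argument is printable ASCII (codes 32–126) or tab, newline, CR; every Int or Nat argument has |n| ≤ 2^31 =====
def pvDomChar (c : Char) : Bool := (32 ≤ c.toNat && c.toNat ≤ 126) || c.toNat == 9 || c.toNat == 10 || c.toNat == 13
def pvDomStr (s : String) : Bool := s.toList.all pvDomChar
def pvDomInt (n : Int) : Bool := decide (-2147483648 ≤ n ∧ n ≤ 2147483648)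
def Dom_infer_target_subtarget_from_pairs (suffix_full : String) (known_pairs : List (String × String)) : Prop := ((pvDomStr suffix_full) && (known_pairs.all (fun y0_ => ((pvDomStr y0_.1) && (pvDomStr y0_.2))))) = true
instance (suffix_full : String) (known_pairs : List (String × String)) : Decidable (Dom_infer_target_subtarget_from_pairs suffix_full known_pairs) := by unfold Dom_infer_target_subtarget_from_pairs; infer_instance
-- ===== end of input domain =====

-- B re-implements A by a reversed traversal: build a first-wins dict from marker strings to pairs once,
-- then scan the string's suffixes no longer than the longest marker, longest-first, returning the first hit (objective: alternative).

-- ===== PORT A =====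
-- the f-string marker f"_{target}_{subtarget}", as its exact list of code points (shared by both ports)
def pvMarker (p : String × String) : List Char := '_' :: p.1.toList ++ '_' :: p.2.toList

-- the body of A's for-loop (state = (best, best_len))
def pvStepA (cs : List Char) (acc : Option (String × String) × Int) (p : String × String) :
    Option (String × String) × Int :=
  let marker := pvMarker p
  if PySem.Chars.endswith cs marker then
    let score := PySem.Str.len p.1 + PySem.Str.len p.2
    if score > acc.2 then (some p, score) else acc
  else acc

def infer_target_subtarget_from_pairs (suffix_full : String) (known_pairs : List (String × String)) :
    Option String × Option String :=
  let r := known_pairs.foldl (pvStepA suffix_full.toList) (none, -1)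
  match r.1 with
  | some (t, s) => (some t, some s)
  | none => (none, none)

-- ===== PORT B =====
-- the body of B's first loop: 'if marker not in index: index[marker] = (target, subtarget)'
def pvStepB (d : PySem.Dict (List Char) (String × String)) (p : String × String) :
    PySem.Dict (List Char) (String × String) :=
  let marker := pvMarker p
  if d.contains marker then d else d.insert marker p

-- B's last loop: 'for i in range(max(0, len(suffix_full)-longest), len(suffix_full)+1): if suffix_full[i:] in index: return index[...]'
def pvScan (cs : List Char) (d : PySem.Dict (List Char) (String × String)) :
    List Int → Option String × Option String
  | [] => (none, none)
  | i :: rest =>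
    match d.get? (PySem.List.slice cs (some i) none) with
    | some p => (some p.1, some p.2)
    | none => pvScan cs d rest

def infer_target_subtarget_from_pairs_alt (suffix_full : String) (known_pairs : List (String × String)) :
    Option String × Option String :=
  let index := known_pairs.foldl pvStepB PySem.Dict.empty
  -- 'longest = 0; for marker in index: longest = max(longest, len(marker))'
  let longest := index.keys.foldl (fun acc k => max acc (PySem.List.len k)) 0
  pvScan suffix_full.toList index
    (PySem.List.pyRange (max 0 (PySem.Str.len suffix_full - longest)) (PySem.Str.len suffix_full + 1) 1)

-- ===== PRECONDITION & SPEC =====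
def Spec_infer_target_subtarget_from_pairs (suffix_full : String) (known_pairs : List (String × String)) (out : Option String × Option String) : Prop := out = infer_target_subtarget_from_pairs_alt suffix_full known_pairs
instance (suffix_full : String) (known_pairs : List (String × String)) (out : Option String × Option String) : Decidable (Spec_infer_target_subtarget_from_pairs suffix_full known_pairs out) := by unfold Spec_infer_target_subtarget_from_pairs; infer_instance

-- ===== CLAIM (what is proved, stated in full; the proofs are below) =====
def Claim_equal_infer_target_subtarget_from_pairs : Prop := ∀ (suffix_full : String) (known_pairs : List (String × String)), Dom_infer_target_subtarget_from_pairs suffix_full known_pairs → Spec_infer_target_subtarget_from_pairs suffix_full known_pairs (infer_target_subtarget_from_pairs suffix_full known_pairs)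

-- ===== LEMMAS AND PROOFS =====

-- score of a pair, and the maximal score among markers of `l` that are suffixes of `cs` (-1 if none)
def pvScore (p : String × String) : Int := PySem.Str.len p.1 + PySem.Str.len p.2

def pvMs (cs : List Char) : List (String × String) → Int
  | [] => -1
  | p :: l => if PySem.Chars.endswith cs (pvMarker p) then max (pvScore p) (pvMs cs l) else pvMs cs l

lemma pvScore_nonneg (p : String × String) : 0 ≤ pvScore p := by
  simp [pvScore, PySem.Str.len_eq]; positivity

lemma pvMs_le (cs : List Char) {l : List (String × String)} {p : String × String}
    (hmem : p ∈ l) (hm : PySem.Chars.endswith cs (pvMarker p) = true) :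
    pvScore p ≤ pvMs cs l := by
  induction l with
  | nil => cases hmem
  | cons q tl ih =>
    rcases List.mem_cons.mp hmem with rfl | hmem'
    · simp only [pvMs, hm, if_true]; exact le_max_left _ _
    · simp only [pvMs]
      split_ifs with h
      · exact le_trans (ih hmem') (le_max_right _ _)
      · exact ih hmem'

lemma pvMs_attained (cs : List Char) {l : List (String × String)} (h : -1 < pvMs cs l) :
    ∃ p ∈ l, PySem.Chars.endswith cs (pvMarker p) = true ∧ pvScore p = pvMs cs l := by
  induction l with
  | nil => simp [pvMs] at h
  | cons q tl ih =>
    simp only [pvMs] at h ⊢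
    split_ifs at h ⊢ with hq
    · rcases le_or_gt (pvMs cs tl) (pvScore q) with hle | hlt
      · exact ⟨q, List.mem_cons_self .., hq, (max_eq_left hle).symm⟩
      · obtain ⟨p, hp, hpm, hps⟩ := ih (by have := pvScore_nonneg q; omega)
        exact ⟨p, List.mem_cons_of_mem _ hp, hpm, by rw [hps, max_eq_right hlt.le]⟩
    · obtain ⟨p, hp, hpm, hps⟩ := ih h
      exact ⟨p, List.mem_cons_of_mem _ hp, hpm, hps⟩

-- characterization of A's fold: the first pair attaining the maximal score wins
lemma foldA_eq (cs : List Char) (l : List (String × String))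
    (b : Option (String × String)) (bl : Int) (hbl : -1 ≤ bl) :
    l.foldl (pvStepA cs) (b, bl) =
      ((if bl < pvMs cs l then
          l.find? (fun p => PySem.Chars.endswith cs (pvMarker p) && pvScore p == pvMs cs l)
        else b),
       max bl (pvMs cs l)) := by
  induction l generalizing b bl with
  | nil =>
    simp only [List.foldl_nil, pvMs]
    rw [if_neg (by omega), max_eq_left (by omega)]
  | cons p tl ih =>
    simp only [List.foldl_cons, pvStepA, pvMs]
    by_cases hm : PySem.Chars.endswith cs (pvMarker p) = true
    · rw [hm]
      simp only [if_true]
      have hsc : PySem.Str.len p.1 + PySem.Str.len p.2 = pvScore p := rfl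
      rw [hsc]
      by_cases hgt : pvScore p > bl
      · rw [if_pos hgt, ih (some p) (pvScore p) (le_trans (by omega) (pvScore_nonneg p))]
        rcases le_or_gt (pvMs cs tl) (pvScore p) with hle | hlt
        · rw [max_eq_left hle]
          rw [if_neg (show ¬ pvScore p < pvMs cs tl by omega),
              if_pos (show bl < pvScore p by omega)]
          rw [List.find?_cons_of_pos (by simp [hm]), max_eq_right (by omega)]
        · rw [max_eq_right hlt.le]
          have hfind : List.find? (fun q => PySem.Chars.endswith cs (pvMarker q) && pvScore q == pvMs cs tl) (p :: tl) =
              List.find? (fun q => PySem.Chars.endswith cs (pvMarker q) && pvScore q == pvMs cs tl) tl := by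
            rw [List.find?_cons_of_neg]
            simp [hm]
            omega
          rw [if_pos hlt, if_pos (show bl < pvMs cs tl by omega), hfind,
              max_eq_right (show bl ≤ pvMs cs tl by omega)]
      · rw [if_neg hgt, ih b bl hbl]
        by_cases hc : bl < pvMs cs tl
        · have hmax : max (pvScore p) (pvMs cs tl) = pvMs cs tl := max_eq_right (by omega)
          rw [hmax]
          have hfind : List.find? (fun q => PySem.Chars.endswith cs (pvMarker q) && pvScore q == pvMs cs tl) (p :: tl) =
              List.find? (fun q => PySem.Chars.endswith cs (pvMarker q) && pvScore q == pvMs cs tl) tl := by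
            rw [List.find?_cons_of_neg]
            simp [hm]
            omega
          rw [if_pos hc, if_pos hc, hfind]
        · have hle2 : max (pvScore p) (pvMs cs tl) ≤ bl := max_le (by omega) (by omega)
          have h1 : ¬ bl < max (pvScore p) (pvMs cs tl) := not_lt.mpr hle2
          rw [if_neg hc, if_neg h1, max_eq_left hle2,
              max_eq_left (show pvMs cs tl ≤ bl by omega)]
    · rw [Bool.not_eq_true] at hm
      rw [hm]
      simp only [Bool.false_eq_true, if_false]
      have hfind : List.find? (fun q => PySem.Chars.endswith cs (pvMarker q) && pvScore q == pvMs cs tl) (p :: tl) =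
          List.find? (fun q => PySem.Chars.endswith cs (pvMarker q) && pvScore q == pvMs cs tl) tl := by
        rw [List.find?_cons_of_neg]
        simp [hm]
      rw [hfind]
      exact ih b bl hbl

-- characterization of B's dict: first-wins lookup = first pair in the list with that marker
lemma get?_build (l : List (String × String)) (d0 : PySem.Dict (List Char) (String × String))
    (m : List Char) :
    (l.foldl pvStepB d0).get? m = (d0.get? m).or (l.find? (fun p => pvMarker p == m)) := by
  induction l generalizing d0 with
  | nil => simp [List.foldl_nil]
  | cons p tl ih =>
    simp only [List.foldl_cons, pvStepB]
    by_cases hc : d0.contains (pvMarker p) = true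
    · rw [if_pos hc, ih]
      by_cases hm : pvMarker p = m
      · subst hm
        have hs : (d0.get? (pvMarker p)).isSome := by
          rw [← PySem.Dict.contains_eq_isSome_get?]; exact hc
        obtain ⟨v, hv⟩ := Option.isSome_iff_exists.mp hs
        rw [hv]; simp
      · have : List.find? (fun q => pvMarker q == m) (p :: tl) =
            List.find? (fun q => pvMarker q == m) tl := by
          rw [List.find?_cons_of_neg]; simp [hm]
        rw [this]
    · rw [Bool.not_eq_true] at hc
      rw [hc]
      simp only [Bool.false_eq_true, if_false]
      rw [ih]
      have h0 : d0.get? (pvMarker p) = none := by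
        have := PySem.Dict.contains_eq_isSome_get? (d := d0) (k := pvMarker p)
        rw [hc] at this
        exact Option.not_isSome_iff_eq_none.mp (by simp [← this])
      by_cases hm : pvMarker p = m
      · subst hm
        rw [PySem.Dict.get?_insert_self, h0]
        have : List.find? (fun q => pvMarker q == pvMarker p) (p :: tl) = some p := by
          rw [List.find?_cons_of_pos]; simp
        rw [this]; simp
      · rw [PySem.Dict.get?_insert_of_ne _ _ (fun h => hm h.symm)]
        have : List.find? (fun q => pvMarker q == m) (p :: tl) =
            List.find? (fun q => pvMarker q == m) tl := by
          rw [List.find?_cons_of_neg]; simp [hm]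
        rw [this]

lemma pvScan_none {cs : List Char} {d : PySem.Dict (List Char) (String × String)} {r : List Int}
    (h : ∀ i ∈ r, d.get? (PySem.List.slice cs (some i) none) = none) :
    pvScan cs d r = (none, none) := by
  induction r with
  | nil => rfl
  | cons i rest ih =>
    simp only [pvScan, h i (List.mem_cons_self ..)]
    exact ih (fun j hj => h j (List.mem_cons_of_mem _ hj))

lemma pvScan_append_none {cs : List Char} {d : PySem.Dict (List Char) (String × String)}
    {r1 : List Int} (r2 : List Int)
    (h : ∀ i ∈ r1, d.get? (PySem.List.slice cs (some i) none) = none) :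
    pvScan cs d (r1 ++ r2) = pvScan cs d r2 := by
  induction r1 with
  | nil => rfl
  | cons i rest ih =>
    simp only [List.cons_append, pvScan, h i (List.mem_cons_self ..)]
    exact ih (fun j hj => h j (List.mem_cons_of_mem _ hj))

lemma find?_congr_mem {α : Type} {l : List α} {f g : α → Bool}
    (h : ∀ x ∈ l, f x = g x) : l.find? f = l.find? g := by
  induction l with
  | nil => rfl
  | cons x tl ih =>
    have hx := h x (List.mem_cons_self ..)
    simp only [List.find?_cons, hx]
    cases g x
    · exact ih (fun y hy => h y (List.mem_cons_of_mem _ hy))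
    · rfl

lemma suffix_drop_eq {u cs : List Char} (h : u <:+ cs) :
    cs.drop (cs.length - u.length) = u := by
  obtain ⟨a, rfl⟩ := h
  simp

lemma length_pvMarker (p : String × String) :
    (pvMarker p).length = p.1.toList.length + p.2.toList.length + 2 := by
  simp [pvMarker]; omega

lemma pvScore_eq (p : String × String) :
    pvScore p = (p.1.toList.length : Int) + (p.2.toList.length : Int) := by
  simp [pvScore, PySem.Str.len_eq]

lemma foldl_max_init_le (ks : List (List Char)) (c : Int) :
    c ≤ ks.foldl (fun acc k => max acc (PySem.List.len k)) c := by
  induction ks generalizing c with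
  | nil => exact le_rfl
  | cons k tl ih => exact le_trans (le_max_left _ _) (ih _)

lemma len_le_foldl_max {ks : List (List Char)} {x : List Char} (hx : x ∈ ks) (c : Int) :
    PySem.List.len x ≤ ks.foldl (fun acc k => max acc (PySem.List.len k)) c := by
  induction ks generalizing c with
  | nil => cases hx
  | cons k tl ih =>
    rcases List.mem_cons.mp hx with rfl | h
    · exact le_trans (le_max_right _ _) (foldl_max_init_le tl _)
    · exact ih h _

-- ===== VERDICT (by name: the statement is the Claim_ definition above) =====
theorem infer_target_subtarget_from_pairs_spec : Claim_equal_infer_target_subtarget_from_pairs := by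
  intro suffix_full known_pairs _hdom
  unfold Spec_infer_target_subtarget_from_pairs
  set cs := suffix_full.toList with hcs
  set l := known_pairs with hl
  set n := cs.length with hn
  set M := pvMs cs l with hM
  -- evaluate A
  simp only [infer_target_subtarget_from_pairs]
  rw [foldA_eq cs l none (-1) le_rfl]
  -- evaluate B's dict
  simp only [infer_target_subtarget_from_pairs_alt]
  have hget : ∀ m, ((l.foldl pvStepB PySem.Dict.empty).get? m) =
      l.find? (fun p => pvMarker p == m) := by
    intro m
    rw [get?_build]
    simp
  have hlen : PySem.Str.len suffix_full = (n : Int) := by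
    rw [PySem.Str.len_eq]
  rw [hlen]
  set L : Int := (List.foldl pvStepB PySem.Dict.empty l).keys.foldl (fun acc k => max acc (PySem.List.len k)) 0 with hLdef
  have hL0 : 0 ≤ L := foldl_max_init_le _ 0
  by_cases hMpos : -1 < M
  · -- there is a match: both return the first pair whose marker is the longest matching suffix
    obtain ⟨q, hq_mem, hq_match, hq_score⟩ := pvMs_attained cs (hM ▸ hMpos)
    have hq_suf : pvMarker q <:+ cs := (PySem.Chars.endswith_iff cs (pvMarker q)).mp hq_match
    have hq_len : (pvMarker q).length = M.toNat + 2 := by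
      have h1 := length_pvMarker q
      have h2 := pvScore_eq q
      have hM0 : 0 ≤ M := le_trans (pvScore_nonneg q) (le_of_eq (hM ▸ hq_score))
      rw [← hM] at hq_score
      omega
    have hLle : M.toNat + 2 ≤ n := by
      have := hq_suf.length_le
      omega
    -- the longest marker is a key of the index, so its length is at most L
    have hfindq : (l.find? (fun p => pvMarker p == pvMarker q)).isSome :=
      List.find?_isSome.mpr ⟨q, hq_mem, by simp⟩
    obtain ⟨q', hq'⟩ := Option.isSome_iff_exists.mp hfindq
    have hdget : (l.foldl pvStepB PySem.Dict.empty).get? (pvMarker q) = some q' := by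
      rw [hget]; exact hq'
    have hmem_keys : pvMarker q ∈ (l.foldl pvStepB PySem.Dict.empty).keys := by
      by_contra hnot
      rw [(PySem.Dict.get?_eq_none_iff_not_mem_keys _ _).mpr hnot] at hdget
      cases hdget
    have hLq : ((pvMarker q).length : Int) ≤ L := by
      have := len_le_foldl_max hmem_keys 0
      rwa [PySem.List.len_eq] at this
    set j : Nat := n - (M.toNat + 2) with hj
    have hdropj : cs.drop j = pvMarker q := by
      have := suffix_drop_eq hq_suf
      rw [hq_len] at this
      exact this
    -- the scanned range splits at j
    have hsplit : PySem.List.pyRange (max 0 ((n : Int) - L)) ((n : Int) + 1) 1 =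
        PySem.List.pyRange (max 0 ((n : Int) - L)) (j : Int) 1 ++ PySem.List.pyRange (j : Int) ((n : Int) + 1) 1 := by
      exact PySem.List.pyRange_one_append _ (j : Int) ((n : Int) + 1)
        (max_le (by omega) (by omega)) (by omega)
    rw [hsplit]
    -- suffixes longer than the best marker are in nobody's index
    have hfirst : ∀ i ∈ PySem.List.pyRange (max 0 ((n : Int) - L)) (j : Int) 1,
        ((l.foldl pvStepB PySem.Dict.empty).get? (PySem.List.slice cs (some i) none)) = none := by
      intro i hi
      obtain ⟨hi0', hij⟩ := (PySem.List.mem_pyRange_one).mp hi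
      have hi0 : (0 : Int) ≤ i := le_trans (le_max_left _ _) hi0'
      rw [hget]
      cases hfind : l.find? (fun p => pvMarker p == PySem.List.slice cs (some i) none) with
      | none => rfl
      | some p =>
        exfalso
        have hp_mem := List.mem_of_find?_eq_some hfind
        have hp_eq : pvMarker p = PySem.List.slice cs (some i) none := by
          have := List.find?_some hfind
          simpa using this
        rw [PySem.List.slice_from cs hi0] at hp_eq
        have hsuf : pvMarker p <:+ cs := hp_eq ▸ List.drop_suffix _ _
        have hmatch : PySem.Chars.endswith cs (pvMarker p) = true :=
          (PySem.Chars.endswith_iff cs (pvMarker p)).mpr hsuf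
        have hle := pvMs_le cs hp_mem hmatch
        rw [← hM] at hle
        have hlenp : (pvMarker p).length = n - i.toNat := by
          rw [hp_eq, List.length_drop]
        have hitoNat : i.toNat < j := by omega
        have hscorep := pvScore_eq p
        have hlenp2 := length_pvMarker p
        have hM0 : 0 ≤ M := le_trans (pvScore_nonneg q) (le_of_eq (hM ▸ hq_score))
        omega
    rw [pvScan_append_none _ hfirst]
    have hjlt : (j : Int) < (n : Int) + 1 := by omega
    rw [PySem.List.pyRange_one_cons hjlt]
    -- at position j the lookup succeeds, with the same first pair A selects
    have hslicej : PySem.List.slice cs (some (j : Int)) none = cs.drop j := by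
      rw [PySem.List.slice_from cs (by positivity)]
      simp
    have hpred : ∀ p ∈ l, (pvMarker p == cs.drop j) =
        (PySem.Chars.endswith cs (pvMarker p) && pvScore p == M) := by
      intro p _hp
      by_cases he : pvMarker p = cs.drop j
      · have hsuf : pvMarker p <:+ cs := he ▸ List.drop_suffix _ _
        have hmatch : PySem.Chars.endswith cs (pvMarker p) = true :=
          (PySem.Chars.endswith_iff cs (pvMarker p)).mpr hsuf
        have hlenp : (pvMarker p).length = M.toNat + 2 := by
          rw [he, List.length_drop]; omega
        have hscorep : pvScore p = M := by
          have h1 := length_pvMarker p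
          have h2 := pvScore_eq p
          have hM0 : 0 ≤ M := le_trans (pvScore_nonneg q) (le_of_eq (hM ▸ hq_score))
          omega
        have hmatch2 : PySem.Chars.endswith cs (List.drop j cs) = true := he ▸ hmatch
        simp [he, hmatch2, hscorep]
      · have hL : (pvMarker p == cs.drop j) = false := by simp [he]
        rw [hL]
        by_cases hmatch : PySem.Chars.endswith cs (pvMarker p) = true
        · by_cases hscore : pvScore p = M
          · exfalso
            apply he
            have hsuf : pvMarker p <:+ cs := (PySem.Chars.endswith_iff cs (pvMarker p)).mp hmatch
            have hlenp : (pvMarker p).length = M.toNat + 2 := by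
              have h1 := length_pvMarker p
              have h2 := pvScore_eq p
              have hM0 : 0 ≤ M := le_trans (pvScore_nonneg q) (le_of_eq (hM ▸ hq_score))
              omega
            have := suffix_drop_eq hsuf
            rw [hlenp] at this
            rw [← this]
          · simp [hmatch, hscore]
        · simp [hmatch]
    have hfind_eq : l.find? (fun p => pvMarker p == cs.drop j) =
        l.find? (fun p => PySem.Chars.endswith cs (pvMarker p) && pvScore p == M) :=
      find?_congr_mem hpred
    -- A's find? succeeds (q witnesses it)
    have hq_pred : (pvMarker q == cs.drop j) = true := by simp [hdropj]
    have hfind_some : (l.find? (fun p => pvMarker p == cs.drop j)).isSome := by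
      rw [List.find?_isSome]
      exact ⟨q, hq_mem, hq_pred⟩
    obtain ⟨pstar, hpstar⟩ := Option.isSome_iff_exists.mp hfind_some
    simp only [pvScan, hslicej, hget, hpstar]
    rw [if_pos hMpos, ← hfind_eq, hpstar]
  · -- no match: A keeps (None, -1); B's scan finds nothing
    have hnone : ∀ i ∈ PySem.List.pyRange (max 0 ((n : Int) - L)) ((n : Int) + 1) 1,
        ((l.foldl pvStepB PySem.Dict.empty).get? (PySem.List.slice cs (some i) none)) = none := by
      intro i hi
      obtain ⟨hi0', _⟩ := (PySem.List.mem_pyRange_one).mp hi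
      have hi0 : (0 : Int) ≤ i := le_trans (le_max_left _ _) hi0'
      rw [hget]
      cases hfind : l.find? (fun p => pvMarker p == PySem.List.slice cs (some i) none) with
      | none => rfl
      | some p =>
        exfalso
        have hp_mem := List.mem_of_find?_eq_some hfind
        have hp_eq : pvMarker p = PySem.List.slice cs (some i) none := by
          have := List.find?_some hfind
          simpa using this
        rw [PySem.List.slice_from cs hi0] at hp_eq
        have hsuf : pvMarker p <:+ cs := hp_eq ▸ List.drop_suffix _ _
        have hmatch : PySem.Chars.endswith cs (pvMarker p) = true :=
          (PySem.Chars.endswith_iff cs (pvMarker p)).mpr hsuf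
        have hle := pvMs_le cs hp_mem hmatch
        have h0 := pvScore_nonneg p
        rw [← hM] at hle
        omega
    rw [pvScan_none hnone, if_neg hMpos]
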